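-- pv_equiv track=rewrite | github.com/Jungliana/AoC | AoC-2022/Day06/day06.py | solve
-- ===== SOURCE A (Python) =====
-- def all_charas_different(token: list) -> bool:
--     """Check if every item in a list is different."""
--     for i in range(len(token)-1):
--         if token[i] in token[i+1:]:
--             return False
--     return True
--
-- def solve(stream: str, length: int) -> int:
--     """Solve part 1 and part 2 of the puzzle."""
--     que = list(stream[0:length])
--     counter = length
--     if all_charas_different(que):
--         return counter
--     for character in stream[length:]:
--         counter += 1
--         que.pop(0)
--         que.append(character)
--         if all_charas_different(que):
--             return counter
--     return counter
-- ===== SOURCE B (Python) =====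
-- def solve(stream: str, length: int) -> int:
--     """Sliding window over end positions with a last-seen index map (O(n))."""
--     n = len(stream)
--     last = {}
--     start = 0
--     for i, ch in enumerate(stream):
--         j = last.get(ch)
--         if j is not None and j >= start:
--             start = j + 1
--         last[ch] = i
--         if i - start + 1 >= length:
--             return i + 1
--     return max(length, n)
-- ===== Notes on version B (the rewrite author's own statement) =====
-- stated objective: faster
-- what changed: Replaces the re-check of every window by pairwise scans (pop/append a queue and rescan it) with a single pass keeping a last-seen-index dict and a window start pointer, returning at the first end position whose distinct window reaches the required length.
-- outside the precondition, e.g. on solve('abc', 0): A returns 0, B returns 1; on solve('abc', -1): A returns -1, B returns 1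
import Mathlib
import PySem

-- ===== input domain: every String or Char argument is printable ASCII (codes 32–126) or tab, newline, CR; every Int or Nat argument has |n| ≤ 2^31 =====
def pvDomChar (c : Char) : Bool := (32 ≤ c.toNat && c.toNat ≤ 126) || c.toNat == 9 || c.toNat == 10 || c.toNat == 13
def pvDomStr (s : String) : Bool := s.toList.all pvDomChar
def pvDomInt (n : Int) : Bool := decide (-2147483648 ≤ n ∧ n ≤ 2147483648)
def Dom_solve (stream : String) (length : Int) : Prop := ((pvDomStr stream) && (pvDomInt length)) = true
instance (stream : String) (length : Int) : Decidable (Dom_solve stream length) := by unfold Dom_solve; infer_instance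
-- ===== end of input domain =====

-- B replaces A's per-window pairwise rescans with one pass keeping a last-seen-index map and a window start pointer.


-- ===== PORT A =====
-- all_charas_different: the early-return-False loop over range(len(token)-1) is `.all` over
-- the same range; token[i] has 0 ≤ i < len so `getD` is exact, token[i+1:] is `drop (i+1)`.
def allCharasDifferent (token : List Char) : Bool :=
  (List.range (token.length - 1)).all fun i =>
    !((token.drop (i + 1)).contains (token.getD i ' '))

-- the `for character in stream[length:]` loop of A, with early return; state = (que, counter).
-- que.pop(0) is `drop 1` (que is nonempty whenever the loop body runs: an empty que would
-- have passed the all-different check and returned before the loop), que.append is `++ [c]`.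
def solveLoop : List Char → List Char → Int → Int
  | [], _, counter => counter
  | c :: rest, que, counter =>
    let counter' := counter + 1
    let que' := que.drop 1 ++ [c]
    if allCharasDifferent que' then counter' else solveLoop rest que' counter'

def solve (stream : String) (length : Int) : Int :=
  let s := stream.toList
  let que := PySem.List.slice s (some 0) (some length)
  let counter := length
  if allCharasDifferent que then counter
  else solveLoop (PySem.List.slice s (some length) none) que counter

-- ===== PORT B =====
-- the enumerate loop of B: i = current index, last = last-seen-index dict, start = window start.
def solveAltGo (length n : Int) : List Char → Int → PySem.Dict Char Int → Int → Int
  | [], _, _, _ => max length n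
  | c :: rest, i, last, start =>
    let start' : Int :=
      match last.get? c with
      | some j => if start ≤ j then j + 1 else start
      | none => start
    let last' := last.insert c i
    if length ≤ i - start' + 1 then i + 1
    else solveAltGo length n rest (i + 1) last' start'

def solve_alt (stream : String) (length : Int) : Int :=
  solveAltGo length (stream.toList.length : Int) stream.toList 0 PySem.Dict.empty 0

-- ===== PRECONDITION & SPEC =====
-- Pre_ restricts to the natural domain of the puzzle: a positive window length. A also
-- returns values for length ≤ 0 (artifacts of Python slicing, e.g. solve "abc" (-1) = -1),
-- but those are outside the task's natural domain and B does not mirror them.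
def Pre_solve (stream : String) (length : Int) : Prop := 1 ≤ length
instance (stream : String) (length : Int) : Decidable (Pre_solve stream length) := by unfold Pre_solve; infer_instance

def pvWitness_solve : String × Int := ("mjqjpqmgbljsphdztnvjfqwrcgsmlb", 4)

def Spec_solve (stream : String) (length : Int) (out : Int) : Prop := out = solve_alt stream length
instance (stream : String) (length : Int) (out : Int) : Decidable (Spec_solve stream length out) := by unfold Spec_solve; infer_instance

-- ===== CLAIM (what is proved, stated in full; the proofs are below) =====
def Claim_equal_solve : Prop := ∀ (stream : String) (length : Int), Dom_solve stream length → Pre_solve stream length → Spec_solve stream length (solve stream length)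

-- ===== LEMMAS AND PROOFS =====

-- the segment s[t:i] of the character list
def seg (s : List Char) (t i : ℕ) : List Char := (s.drop t).take (i - t)

-- common reference value: L + (first window start k ≥ m whose length-L window is duplicate-free),
-- else max L n.  refFrom s L 0 is the value both ports compute.
def refFrom (s : List Char) (L m : ℕ) : Int :=
  match (List.range' m (s.length - L + 1 - m)).find? (fun k => decide ((s.drop k).take L).Nodup) with
  | some k => ((L + k : ℕ) : Int)
  | none => max (L : Int) (s.length : Int)

-- last occurrence index of c in xs (B's dict stores exactly these)
def lastIdx? : List Char → Char → Option ℕ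
  | [], _ => none
  | x :: r, c =>
    match lastIdx? r c with
    | some j => some (j + 1)
    | none => if x = c then some 0 else none

theorem allCharasDifferent_iff (token : List Char) :
    allCharasDifferent token = true ↔ token.Nodup := by
  unfold allCharasDifferent
  rw [List.all_eq_true]
  constructor
  · intro h
    have hp : List.Pairwise (· ≠ ·) token := by
      rw [List.pairwise_iff_getElem]
      intro i j hi hj hij heq
      have h1 := h i (by rw [List.mem_range]; omega)
      have h2 : token.getD i ' ' ∉ token.drop (i + 1) := by simpa using h1
      apply h2
      rw [List.getD_eq_getElem token ' ' hi, heq, List.mem_iff_getElem?]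
      refine ⟨j - (i + 1), ?_⟩
      rw [List.getElem?_drop, show i + 1 + (j - (i + 1)) = j from by omega,
        List.getElem?_eq_getElem hj]
    exact hp
  · intro h i hi
    rw [List.mem_range] at hi
    suffices hs : token.getD i ' ' ∉ token.drop (i + 1) by simpa using hs
    intro hmem
    obtain ⟨k, hk⟩ := List.mem_iff_getElem?.mp hmem
    rw [List.getElem?_drop] at hk
    have hkl : i + 1 + k < token.length := by
      by_contra hc
      rw [List.getElem?_eq_none (by omega)] at hk
      cases hk
    rw [List.getElem?_eq_getElem hkl] at hk
    have heq : token[i + 1 + k]'hkl = token.getD i ' ' := Option.some.inj hk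
    have hne := List.pairwise_iff_getElem.mp h i (i + 1 + k) (by omega) hkl (by omega)
    exact hne ((heq.trans (List.getD_eq_getElem token ' ' (by omega))).symm)

theorem refFrom_stop (s : List Char) (L m : ℕ) (h : s.length - L + 1 ≤ m) :
    refFrom s L m = max (L : Int) (s.length : Int) := by
  unfold refFrom
  rw [show s.length - L + 1 - m = 0 from by omega, List.range'_zero]
  simp

theorem refFrom_good (s : List Char) (L m : ℕ) (hm : m ≤ s.length - L)
    (hg : ((s.drop m).take L).Nodup) : refFrom s L m = ((L + m : ℕ) : Int) := by
  unfold refFrom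
  rw [show s.length - L + 1 - m = (s.length - L - m) + 1 from by omega, List.range'_succ,
    List.find?_cons_of_pos (by simpa using hg)]

theorem refFrom_bad (s : List Char) (L m : ℕ) (hm : m ≤ s.length - L)
    (hg : ¬ ((s.drop m).take L).Nodup) : refFrom s L m = refFrom s L (m + 1) := by
  unfold refFrom
  rw [show s.length - L + 1 - m = (s.length - L - m) + 1 from by omega, List.range'_succ,
    List.find?_cons_of_neg (by simpa using hg),
    show s.length - L - m = s.length - L + 1 - (m + 1) from by omega]

theorem refFrom_gt (s : List Char) (L : ℕ) (h : s.length < L) :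
    refFrom s L 0 = (L : Int) := by
  unfold refFrom
  rw [show s.length - L + 1 - 0 = 1 from by omega, List.range'_one]
  by_cases hnd : ((s.drop 0).take L).Nodup
  · rw [List.find?_cons_of_pos (by simpa using hnd)]
    simp
  · rw [List.find?_cons_of_neg (by simpa using hnd), List.find?_nil]
    simp only
    omega

theorem seg_zero (s : List Char) (i : ℕ) : seg s 0 i = s.take i := by
  unfold seg
  simp

theorem seg_succ (s : List Char) (t i : ℕ) (ht : t ≤ i) (hi : i < s.length) :
    seg s t (i + 1) = seg s t i ++ [s.getD i ' '] := by
  unfold seg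
  rw [show i + 1 - t = (i - t) + 1 from by omega, List.take_add_one]
  congr 1
  rw [List.getElem?_drop, show t + (i - t) = i from by omega, List.getElem?_eq_getElem hi,
    List.getD_eq_getElem s ' ' hi]
  simp

theorem seg_drop (s : List Char) (t t' i : ℕ) (h : t ≤ t') :
    seg s t' i = (seg s t i).drop (t' - t) := by
  unfold seg
  rw [List.drop_take, List.drop_drop, show t + (t' - t) = t' from by omega,
    show i - t - (t' - t) = i - t' from by omega]

theorem nodup_seg_mono (s : List Char) (t t' i : ℕ) (h : t ≤ t')
    (hn : (seg s t i).Nodup) : (seg s t' i).Nodup := by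
  rw [seg_drop s t t' i h]
  exact (List.drop_sublist _ _).nodup hn

theorem mem_seg (s : List Char) (t i : ℕ) (c : Char) :
    c ∈ seg s t i ↔ ∃ j, t ≤ j ∧ j < i ∧ j < s.length ∧ s.getD j ' ' = c := by
  unfold seg
  constructor
  · intro hc
    obtain ⟨k, hk⟩ := List.mem_iff_getElem?.mp hc
    rw [List.getElem?_take] at hk
    by_cases hki : k < i - t
    · rw [if_pos hki, List.getElem?_drop] at hk
      have hlen : t + k < s.length := by
        by_contra hcon
        rw [List.getElem?_eq_none (by omega)] at hk
        cases hk
      refine ⟨t + k, by omega, by omega, hlen, ?_⟩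
      rw [List.getElem?_eq_getElem hlen] at hk
      rw [List.getD_eq_getElem s ' ' hlen]
      exact Option.some.inj hk
    · rw [if_neg hki] at hk
      cases hk
  · rintro ⟨j, htj, hji, hjn, rfl⟩
    rw [List.mem_iff_getElem?]
    refine ⟨j - t, ?_⟩
    rw [List.getElem?_take, if_pos (by omega), List.getElem?_drop,
      show t + (j - t) = j from by omega, List.getElem?_eq_getElem hjn,
      List.getD_eq_getElem s ' ' hjn]

theorem mem_take_of_mem_seg (s : List Char) (t i : ℕ) (c : Char)
    (h : c ∈ seg s t i) : c ∈ s.take i := by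
  obtain ⟨j, h1, h2, h3, h4⟩ := (mem_seg s t i c).mp h
  rw [← seg_zero]
  exact (mem_seg s 0 i c).mpr ⟨j, by omega, h2, h3, h4⟩

theorem getD_take_eq (s : List Char) (j i : ℕ) (h : j < i) :
    (s.take i).getD j ' ' = s.getD j ' ' := by
  rw [List.getD_eq_getElem?_getD, List.getElem?_take, if_pos h, ← List.getD_eq_getElem?_getD]

theorem lastIdx?_mem (xs : List Char) (c : Char) (j : ℕ) (h : lastIdx? xs c = some j) :
    j < xs.length ∧ xs.getD j ' ' = c := by
  induction xs generalizing j with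
  | nil => simp [lastIdx?] at h
  | cons x r ih =>
    simp only [lastIdx?] at h
    cases hm : lastIdx? r c with
    | none =>
      rw [hm] at h
      split_ifs at h with hx
      · cases h
        exact ⟨by simp, by simpa using hx⟩
    | some j0 =>
      rw [hm] at h
      cases h
      obtain ⟨h1, h2⟩ := ih j0 hm
      exact ⟨by simp; omega, by simpa using h2⟩

theorem lastIdx?_none (xs : List Char) (c : Char) (h : lastIdx? xs c = none) : c ∉ xs := by
  induction xs with
  | nil => simp
  | cons x r ih =>
    simp only [lastIdx?] at h
    cases hm : lastIdx? r c with
    | none =>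
      rw [hm] at h
      split_ifs at h with hx
      intro hc
      rcases List.mem_cons.mp hc with hc | hc
      · exact hx hc.symm
      · exact ih hm hc
    | some j0 =>
      rw [hm] at h
      cases h

theorem lastIdx?_last (xs : List Char) (c : Char) (j : ℕ) (h : lastIdx? xs c = some j) :
    ∀ j', j < j' → j' < xs.length → xs.getD j' ' ' ≠ c := by
  induction xs generalizing j with
  | nil => simp [lastIdx?] at h
  | cons x r ih =>
    simp only [lastIdx?] at h
    cases hm : lastIdx? r c with
    | none =>
      rw [hm] at h
      split_ifs at h with hx
      cases h
      intro j' h1 h2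
      rw [show j' = (j' - 1) + 1 from by omega, List.getD_cons_succ]
      intro hc
      apply lastIdx?_none r c hm
      rw [← hc]
      have hlt : j' - 1 < r.length := by simp at h2; omega
      rw [List.getD_eq_getElem r ' ' hlt]
      exact List.getElem_mem hlt
    | some j0 =>
      rw [hm] at h
      cases h
      intro j' h1 h2
      rw [show j' = (j' - 1) + 1 from by omega, List.getD_cons_succ]
      exact ih j0 hm (j' - 1) (by omega) (by simp at h2; omega)

theorem lastIdx?_take_last (s : List Char) (i : ℕ) (c : Char) (j : ℕ) (hin : i ≤ s.length)
    (hml : lastIdx? (s.take i) c = some j) :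
    ∀ j', j < j' → j' < i → s.getD j' ' ' ≠ c := by
  intro j' h1 h2
  have hlen : (s.take i).length = i := by simp; omega
  have := lastIdx?_last _ _ _ hml j' h1 (by omega)
  rwa [getD_take_eq s j' i h2] at this

theorem not_mem_seg_last (s : List Char) (i : ℕ) (c : Char) (j : ℕ) (hin : i ≤ s.length)
    (hml : lastIdx? (s.take i) c = some j) (t : ℕ) (hjt : j < t) : c ∉ seg s t i := by
  intro hc
  obtain ⟨j', h1, h2, h3, h4⟩ := (mem_seg s t i c).mp hc
  exact lastIdx?_take_last s i c j hin hml j' (by omega) h2 h4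

theorem win_step (s : List Char) (L k : ℕ) (hL : 1 ≤ L) (h : L + k < s.length) :
    ((s.drop k).take L).drop 1 ++ [s.getD (L + k) ' '] = (s.drop (k + 1)).take L := by
  have hR : (s.drop (k + 1)).take L = (s.drop (k + 1)).take (L - 1) ++ [s.getD (L + k) ' '] := by
    conv_lhs => rw [show L = (L - 1) + 1 from by omega]
    rw [List.take_add_one, List.getElem?_drop, show k + 1 + (L - 1) = L + k from by omega,
      List.getElem?_eq_getElem h, ← List.getD_eq_getElem s ' ' h]
    simp
  rw [List.drop_take, List.drop_drop, hR]

theorem lemA (s : List Char) (L : ℕ) (hL : 1 ≤ L) (hLn : L ≤ s.length) :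
    ∀ d k, k + L ≤ s.length → d = s.length - (L + k) →
    solveLoop (s.drop (L + k)) ((s.drop k).take L) ((L : Int) + (k : Int)) = refFrom s L (k + 1) := by
  intro d
  induction d with
  | zero =>
    intro k hk hd
    have hnk : L + k = s.length := by omega
    rw [hnk, List.drop_length]
    simp only [solveLoop]
    rw [refFrom_stop s L (k + 1) (by omega)]
    omega
  | succ d ih =>
    intro k hk hd
    have hlt : L + k < s.length := by omega
    rw [List.drop_eq_getElem_cons hlt]
    simp only [solveLoop]
    rw [← List.getD_eq_getElem s ' ' hlt, win_step s L k hL hlt]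
    by_cases hgood : ((s.drop (k + 1)).take L).Nodup
    · rw [if_pos ((allCharasDifferent_iff _).mpr hgood)]
      rw [refFrom_good s L (k + 1) (by omega) hgood]
      omega
    · rw [if_neg (fun hc => hgood ((allCharasDifferent_iff _).mp hc))]
      have hr := ih (k + 1) (by omega) (by omega)
      rw [show (L : Int) + (k : Int) + 1 = (L : Int) + ((k + 1 : ℕ) : Int) from by push_cast; ring,
        show L + k + 1 = L + (k + 1) from by omega, hr]
      exact (refFrom_bad s L (k + 1) (by omega) hgood).symm

theorem A_eq_ref (stream : String) (L : ℕ) (hL : 1 ≤ L) :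
    solve stream (L : Int) = refFrom stream.toList L 0 := by
  unfold solve
  simp only [PySem.List.slice_zero_start, PySem.List.slice_to_natCast, PySem.List.slice_from_natCast]
  by_cases hn : L ≤ stream.toList.length
  · by_cases hg : (stream.toList.take L).Nodup
    · rw [if_pos ((allCharasDifferent_iff _).mpr hg)]
      rw [refFrom_good stream.toList L 0 (by omega) (by rw [List.drop_zero]; exact hg)]
      simp
    · rw [if_neg (fun hc => hg ((allCharasDifferent_iff _).mp hc))]
      have h0 := lemA stream.toList L hL hn (stream.toList.length - (L + 0)) 0 (by omega) rfl
      simp only [List.drop_zero, Nat.cast_zero, add_zero] at h0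
      rw [h0]
      exact (refFrom_bad stream.toList L 0 (by omega) (by rw [List.drop_zero]; exact hg)).symm
  · have htake : stream.toList.take L = stream.toList := List.take_of_length_le (by omega)
    have hdrop : stream.toList.drop L = [] := List.drop_eq_nil_of_le (by omega)
    rw [htake, hdrop, refFrom_gt stream.toList L (by omega)]
    by_cases hg : stream.toList.Nodup
    · rw [if_pos ((allCharasDifferent_iff _).mpr hg)]
    · rw [if_neg (fun hc => hg ((allCharasDifferent_iff _).mp hc))]
      simp only [solveLoop]

theorem lastIdx?_append (xs : List Char) (x c : Char) :
    lastIdx? (xs ++ [x]) c = if x = c then some xs.length else lastIdx? xs c := by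
  induction xs with
  | nil => simp [lastIdx?]
  | cons y r ih =>
    simp only [List.cons_append, lastIdx?, ih, List.length_cons]
    split_ifs <;> rfl

theorem dict_step (s : List Char) (i : ℕ) (hilt : i < s.length) (last : PySem.Dict Char Int)
    (hdict : ∀ c, last.get? c = (lastIdx? (s.take i) c).map (fun j => (j : Int))) :
    ∀ c', (last.insert (s.getD i ' ') (i : Int)).get? c'
        = (lastIdx? (s.take (i + 1)) c').map (fun j => (j : Int)) := by
  intro c'
  have htk : s.take (i + 1) = s.take i ++ [s.getD i ' '] := by
    rw [List.take_add_one, List.getElem?_eq_getElem hilt, ← List.getD_eq_getElem s ' ' hilt]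
    simp
  have hlen : (s.take i).length = i := by simp; omega
  rw [PySem.Dict.get?_insert, htk, lastIdx?_append]
  by_cases hc : c' = s.getD i ' '
  · rw [if_pos hc, if_pos hc.symm, hlen]
    simp
  · rw [if_neg hc, if_neg (fun hh => hc hh.symm)]
    exact hdict c'

theorem lemB_cont (s : List Char) (L : ℕ) (hL : 1 ≤ L) (d : ℕ)
    (ih : ∀ (i st : ℕ) (last : PySem.Dict Char Int), d = s.length - i → i ≤ s.length → st ≤ i →
      (seg s st i).Nodup → (∀ t, t < st → ¬ (seg s t i).Nodup) →
      (∀ c, last.get? c = (lastIdx? (s.take i) c).map (fun j => (j : Int))) →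
      solveAltGo (L : Int) (s.length : Int) (s.drop i) (i : Int) last (st : Int)
        = refFrom s L (i + 1 - L))
    (i st' : ℕ) (last' : PySem.Dict Char Int) (hd : d = s.length - (i + 1)) (hilt : i < s.length)
    (hst' : st' ≤ i + 1)
    (C1 : (seg s st' (i + 1)).Nodup)
    (C2 : ∀ t, t < st' → ¬ (seg s t (i + 1)).Nodup)
    (hdict' : ∀ c, last'.get? c = (lastIdx? (s.take (i + 1)) c).map (fun j => (j : Int))) :
    (if (L : Int) ≤ (i : Int) - (st' : Int) + 1 then (i : Int) + 1
     else solveAltGo (L : Int) (s.length : Int) (s.drop (i + 1)) ((i : Int) + 1) last' (st' : Int))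
      = refFrom s L (i + 1 - L) := by
  by_cases hcond : (L : Int) ≤ (i : Int) - (st' : Int) + 1
  · rw [if_pos hcond]
    have hLi : L + st' ≤ i + 1 := by omega
    have hgood : ((s.drop (i + 1 - L)).take L).Nodup := by
      have heq : (s.drop (i + 1 - L)).take L = seg s (i + 1 - L) (i + 1) := by
        unfold seg
        rw [show i + 1 - (i + 1 - L) = L from by omega]
      rw [heq]
      exact nodup_seg_mono s st' (i + 1 - L) (i + 1) (by omega) C1
    rw [refFrom_good s L (i + 1 - L) (by omega) hgood]
    omega
  · rw [if_neg hcond]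
    have hcond' : i + 1 < L + st' := by omega
    have hrec := ih (i + 1) st' last' hd (by omega) hst' C1 C2 hdict'
    rw [show (i : Int) + 1 = ((i + 1 : ℕ) : Int) from by push_cast; ring, hrec]
    by_cases hLe : L ≤ i + 1
    · have hbad : ¬ ((s.drop (i + 1 - L)).take L).Nodup := by
        have heq : (s.drop (i + 1 - L)).take L = seg s (i + 1 - L) (i + 1) := by
          unfold seg
          rw [show i + 1 - (i + 1 - L) = L from by omega]
        rw [heq]
        exact C2 (i + 1 - L) (by omega)
      rw [show i + 1 + 1 - L = (i + 1 - L) + 1 from by omega]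
      exact (refFrom_bad s L (i + 1 - L) (by omega) hbad).symm
    · rw [show i + 1 + 1 - L = 0 from by omega, show i + 1 - L = 0 from by omega]

theorem lemB (s : List Char) (L : ℕ) (hL : 1 ≤ L) :
    ∀ d (i st : ℕ) (last : PySem.Dict Char Int), d = s.length - i → i ≤ s.length → st ≤ i →
    (seg s st i).Nodup → (∀ t, t < st → ¬ (seg s t i).Nodup) →
    (∀ c, last.get? c = (lastIdx? (s.take i) c).map (fun j => (j : Int))) →
    solveAltGo (L : Int) (s.length : Int) (s.drop i) (i : Int) last (st : Int)
      = refFrom s L (i + 1 - L) := by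
  intro d
  induction d with
  | zero =>
    intro i st last hd hi hst hnd hmin hdict
    have hieq : i = s.length := by omega
    subst hieq
    rw [List.drop_length]
    simp only [solveAltGo]
    by_cases hn : L ≤ s.length
    · rw [refFrom_stop s L (s.length + 1 - L) (by omega)]
    · rw [show s.length + 1 - L = 0 from by omega, refFrom_gt s L (by omega)]
      omega
  | succ d ih =>
    intro i st last hd hi hst hnd hmin hdict
    have hilt : i < s.length := by omega
    rw [List.drop_eq_getElem_cons hilt, ← List.getD_eq_getElem s ' ' hilt]
    simp only [solveAltGo]
    have hdict' := dict_step s i hilt last hdict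
    cases hml : lastIdx? (s.take i) (s.getD i ' ') with
    | none =>
      have hgc : last.get? (s.getD i ' ') = none := by rw [hdict (s.getD i ' '), hml]; rfl
      simp only [hgc]
      have hnotin : s.getD i ' ' ∉ seg s st i := fun hc =>
        lastIdx?_none _ _ hml (mem_take_of_mem_seg s st i _ hc)
      refine lemB_cont s L hL d ih i st _ (by omega) hilt (by omega) ?_ ?_ hdict'
      · rw [seg_succ s st i hst hilt]
        exact List.nodup_append.mpr ⟨hnd, List.nodup_singleton _,
          fun a ha b hb => by
            rw [List.mem_singleton] at hb
            subst hb
            intro heq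
            exact hnotin (heq ▸ ha)⟩
      · intro t ht
        rw [seg_succ s t i (by omega) hilt]
        intro h
        exact hmin t ht (List.nodup_append.mp h).1
    | some j =>
      have hgc : last.get? (s.getD i ' ') = some (j : Int) := by
        rw [hdict (s.getD i ' '), hml]; rfl
      simp only [hgc]
      have hlen : (s.take i).length = i := by simp; omega
      obtain ⟨hjl, hjD⟩ := lastIdx?_mem _ _ _ hml
      have hji : j < i := by omega
      have hjval : s.getD j ' ' = s.getD i ' ' := by rwa [getD_take_eq s j i hji] at hjD
      by_cases hjs : st ≤ j
      · rw [show (if (st : Int) ≤ (j : Int) then (j : Int) + 1 else (st : Int)) = ((j + 1 : ℕ) : Int)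
          from by rw [if_pos (by exact_mod_cast hjs)]; push_cast; ring]
        refine lemB_cont s L hL d ih i (j + 1) _ (by omega) hilt (by omega) ?_ ?_ hdict'
        · rw [seg_succ s (j + 1) i (by omega) hilt]
          refine List.nodup_append.mpr ⟨nodup_seg_mono s st (j + 1) i (by omega) hnd,
            List.nodup_singleton _, fun a ha b hb => ?_⟩
          rw [List.mem_singleton] at hb
          subst hb
          intro heq
          exact not_mem_seg_last s i _ j (by omega) hml (j + 1) (by omega) (heq ▸ ha)
        · intro t ht
          rw [seg_succ s t i (by omega) hilt]
          intro h
          have hcmem : s.getD i ' ' ∈ seg s t i :=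
            (mem_seg s t i _).mpr ⟨j, by omega, hji, by omega, hjval⟩
          exact (List.nodup_append.mp h).2.2 _ hcmem _ (by simp) rfl
      · rw [show (if (st : Int) ≤ (j : Int) then (j : Int) + 1 else (st : Int)) = (st : Int)
          from if_neg (by simpa using hjs)]
        have hnotin : s.getD i ' ' ∉ seg s st i :=
          not_mem_seg_last s i _ j (by omega) hml st (by omega)
        refine lemB_cont s L hL d ih i st _ (by omega) hilt (by omega) ?_ ?_ hdict'
        · rw [seg_succ s st i hst hilt]
          exact List.nodup_append.mpr ⟨hnd, List.nodup_singleton _,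
            fun a ha b hb => by
              rw [List.mem_singleton] at hb
              subst hb
              intro heq
              exact hnotin (heq ▸ ha)⟩
        · intro t ht
          rw [seg_succ s t i (by omega) hilt]
          intro h
          exact hmin t ht (List.nodup_append.mp h).1

theorem B_eq_ref (stream : String) (L : ℕ) (hL : 1 ≤ L) :
    solve_alt stream (L : Int) = refFrom stream.toList L 0 := by
  unfold solve_alt
  have h0 := lemB stream.toList L hL stream.toList.length 0 0 PySem.Dict.empty
    (by omega) (by omega) (by omega)
    (by unfold seg; simp)
    (by intro t ht; omega)
    (by intro c; rw [PySem.Dict.get?_empty]; simp [lastIdx?])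
  simp only [List.drop_zero, Nat.cast_zero] at h0
  rw [show 0 + 1 - L = 0 from by omega] at h0
  exact h0

-- ===== VERDICT (by name: the statement is the Claim_ definition above) =====
theorem solve_spec : Claim_equal_solve := by
  intro stream length _ hPre
  unfold Spec_solve
  have h1 : (1 : Int) ≤ length := hPre
  have hrw : length = ((length.toNat : ℕ) : Int) := by omega
  rw [hrw, A_eq_ref stream length.toNat (by omega), B_eq_ref stream length.toNat (by omega)]
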